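-- pv_equiv track=rewrite | github.com/SpaghettiArchitect/python-mooc-2025 | part06-15_word_search/src/word_search.py | check_word_dots
-- ===== SOURCE A (Python) =====
-- def check_word_dots(dictionary: list[str], search_term: str) -> list[str]:
--     results = []
--     for word in dictionary:
--
--         if len(word) != len(search_term):
--             continue
--
--         is_match = True
--         for char in range(len(search_term)):
--             if search_term[char] == word[char] or search_term[char] == ".":
--                 continue
--             else:
--                 is_match = False
--                 break
--
--         if is_match:
--             results.append(word)
--
--     return results
-- ===== SOURCE B (Python) =====
-- def check_word_dots(dictionary: list[str], search_term: str) -> list[str]: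
--     # Position-major sieve: start from the words of the right length, then for
--     # each fixed (non-dot) position of the pattern narrow the surviving
--     # candidates in one pass.  Order of the dictionary is preserved by filter.
--     n = len(search_term)
--     candidates = [w for w in dictionary if len(w) == n]
--     for i, c in enumerate(search_term):
--         if c != ".":
--             candidates = [w for w in candidates if w[i] == c]
--     return candidates
-- ===== Notes on version B (the rewrite author's own statement) =====
-- stated objective: alternative
-- what changed: B transposes the loops: instead of A's word-major scan with a per-word inner loop over all pattern positions, B first keeps the words of the pattern's length and then sieves the surviving candidate list once per fixed (non-dot) pattern position, narrowing it in staged passes.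
import Mathlib
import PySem

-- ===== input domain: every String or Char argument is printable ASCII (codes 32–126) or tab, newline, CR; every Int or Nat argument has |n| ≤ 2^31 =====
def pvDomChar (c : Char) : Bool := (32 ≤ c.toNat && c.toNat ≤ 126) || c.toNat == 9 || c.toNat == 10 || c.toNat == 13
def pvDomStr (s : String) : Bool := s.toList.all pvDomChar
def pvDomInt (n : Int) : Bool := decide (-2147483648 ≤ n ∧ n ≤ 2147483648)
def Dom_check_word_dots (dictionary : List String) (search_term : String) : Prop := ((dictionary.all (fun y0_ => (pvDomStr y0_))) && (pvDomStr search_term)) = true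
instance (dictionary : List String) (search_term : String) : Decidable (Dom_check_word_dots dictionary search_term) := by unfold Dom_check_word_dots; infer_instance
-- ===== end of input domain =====

-- B transposes the loops (position-major sieve: length filter, then one narrowing pass of the
-- candidate list per fixed pattern position) instead of A's word-major scan with an inner loop.

-- ===== PORT A =====
-- Inner loop 'for char in range(len(search_term)): …' with break, as index recursion.
-- The 'none' branch (word[char] out of range would be Python's IndexError) is unreachable:
-- the loop is only entered after the length-equality guard.
def checkWordDotsInner (s w : List Char) (i : Nat) : Bool :=
  if h : i < s.length then
    match w[i]? with
    | some wc => if s[i] = wc ∨ s[i] = '.' then checkWordDotsInner s w (i + 1) else false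
    | none => false
  else true
termination_by s.length - i

def check_word_dots (dictionary : List String) (search_term : String) : List String :=
  dictionary.foldl
    (fun results word =>
      if word.toList.length ≠ search_term.toList.length then results
      else if checkWordDotsInner search_term.toList word.toList 0 then results ++ [word]
      else results)
    []

-- ===== PORT B =====
-- Source B: candidates = words of the pattern's length; then for each (i, c) of the pattern
-- with c ≠ '.', candidates = [w for w in candidates if w[i] == c].
def check_word_dots_alt (dictionary : List String) (search_term : String) : List String :=
  let n := search_term.toList.length
  let candidates := dictionary.filter (fun w => w.toList.length == n)
  (PySem.List.enumerate search_term.toList).foldl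
    (fun cand p =>
      if p.2 ≠ '.' then cand.filter (fun w => PySem.List.pyGet? w.toList p.1 == some p.2)
      else cand)
    candidates

-- ===== PRECONDITION & SPEC =====
def Spec_check_word_dots (dictionary : List String) (search_term : String) (out : List String) : Prop := out = check_word_dots_alt dictionary search_term
instance (dictionary : List String) (search_term : String) (out : List String) : Decidable (Spec_check_word_dots dictionary search_term out) := by unfold Spec_check_word_dots; infer_instance

-- ===== CLAIM (what is proved, stated in full; the proofs are below) =====
def Claim_equal_check_word_dots : Prop := ∀ (dictionary : List String) (search_term : String), Dom_check_word_dots dictionary search_term → Spec_check_word_dots dictionary search_term (check_word_dots dictionary search_term)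

-- ===== LEMMAS AND PROOFS =====

-- A's inner loop from index i answers: every position j ≥ i matches or the pattern has a dot.
lemma checkWordDotsInner_iff (s w : List Char) (hlen : w.length = s.length) :
    ∀ k i, s.length - i ≤ k →
    (checkWordDotsInner s w i = true ↔
      ∀ j (hj : j < s.length), i ≤ j → s[j] = w[j]'(by omega) ∨ s[j] = '.') := by
  intro k
  induction k with
  | zero =>
    intro i hi
    have h : ¬ i < s.length := by omega
    rw [checkWordDotsInner]
    simp only [dif_neg h, true_iff]
    intro j hj hij; omega
  | succ k ih =>
    intro i hi
    rw [checkWordDotsInner]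
    by_cases h : i < s.length
    · have hw : w[i]? = some (w[i]'(by omega)) := List.getElem?_eq_getElem (by omega)
      simp only [dif_pos h, hw]
      by_cases hc : s[i] = w[i]'(by omega) ∨ s[i] = '.'
      · rw [if_pos hc, ih (i + 1) (by omega)]
        constructor
        · intro H j hj hij
          rcases Nat.eq_or_lt_of_le hij with rfl | hlt
          · exact hc
          · exact H j hj hlt
        · intro H j hj hij; exact H j hj (by omega)
      · rw [if_neg hc]
        simp only [Bool.false_eq_true, false_iff]
        intro H; exact hc (H i h le_rfl)
    · simp only [dif_neg h, true_iff]
      intro j hj hij; omega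

-- B's sieve: folding the per-position filters equals one filter by the conjunction of all
-- per-position tests (order of the candidates is preserved; the passes commute into one).
lemma sieve_eq_filter (ps : List (Int × Char)) (l : List String) :
    ps.foldl
      (fun cand p =>
        if p.2 ≠ '.' then cand.filter (fun w => PySem.List.pyGet? w.toList p.1 == some p.2)
        else cand)
      l =
    l.filter (fun w => ps.all (fun p => (p.2 == '.') || (PySem.List.pyGet? w.toList p.1 == some p.2))) := by
  induction ps generalizing l with
  | nil => simp
  | cons p ps ih =>
    simp only [List.foldl_cons, List.all_cons, ih]
    by_cases hd : p.2 = '.'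
    · simp [hd]
    · rw [if_pos hd, List.filter_filter]
      apply List.filter_congr
      intro w _
      have hb : (p.2 == '.') = false := by simpa using hd
      rw [hb, Bool.false_or]
      exact Bool.and_comm _ _

-- The conjunction over enumerate, pointwise.
lemma all_enum_iff (s w : List Char) :
    ((PySem.List.enumerate s).all
        (fun p => (p.2 == '.') || (PySem.List.pyGet? w p.1 == some p.2)) = true ↔
      ∀ j (hj : j < s.length), s[j] = '.' ∨ PySem.List.pyGet? w (j : Int) = some s[j]) := by
  simp only [List.all_eq_true, PySem.List.mem_enumerate_iff, Bool.or_eq_true, beq_iff_eq]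
  constructor
  · intro H j hj
    simpa using H (((j : Nat) : Int), s[j]) ⟨j, hj, by simp⟩
  · rintro H p ⟨k, hk, rfl⟩
    simpa using H k hk

-- A's inner loop equals B's conjunction of position tests, for words of the right length.
lemma per_word_eq (s w : List Char) (hlen : w.length = s.length) :
    checkWordDotsInner s w 0 =
      (PySem.List.enumerate s).all
        (fun p => (p.2 == '.') || (PySem.List.pyGet? w p.1 == some p.2)) := by
  rw [Bool.eq_iff_iff, checkWordDotsInner_iff s w hlen s.length 0 (by omega), all_enum_iff]
  constructor
  · intro H j hj
    rcases H j hj (Nat.zero_le j) with h | h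
    · right
      rw [PySem.List.pyGet?_natCast, List.getElem?_eq_getElem (by omega), h]
    · exact Or.inl h
  · intro H j hj _
    rcases H j hj with h | h
    · exact Or.inr h
    · left
      rw [PySem.List.pyGet?_natCast, List.getElem?_eq_getElem (by omega)] at h
      exact (Option.some_inj.mp h).symm

-- ===== VERDICT (by name: the statement is the Claim_ definition above) =====
theorem check_word_dots_spec : Claim_equal_check_word_dots := by
  intro d s _
  unfold Spec_check_word_dots check_word_dots check_word_dots_alt
  have hbody : (fun (results : List String) (word : String) =>
      if word.toList.length ≠ s.toList.length then results
      else if checkWordDotsInner s.toList word.toList 0 then results ++ [word]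
      else results) =
      (fun results word =>
        if ((word.toList.length == s.toList.length) &&
            checkWordDotsInner s.toList word.toList 0) then results ++ [word]
        else results) := by
    funext results word
    by_cases hlen : word.toList.length = s.toList.length
    · have hb : (word.toList.length == s.toList.length) = true := beq_iff_eq.mpr hlen
      rw [if_neg (not_not.mpr hlen), hb, Bool.true_and]
    · have hb : (word.toList.length == s.toList.length) = false := beq_eq_false_iff_ne.mpr hlen
      rw [if_pos hlen, hb, Bool.false_and, if_neg (by simp)]
  rw [hbody, PySem.List.foldl_append_if_eq_filter, sieve_eq_filter, List.filter_filter]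
  simp only [List.nil_append]
  apply List.filter_congr
  intro word _
  by_cases hlen : word.toList.length = s.toList.length
  · rw [per_word_eq s.toList word.toList hlen]
    exact Bool.and_comm _ _
  · have hb : (word.toList.length == s.toList.length) = false := beq_eq_false_iff_ne.mpr hlen
    rw [hb, Bool.false_and, Bool.and_false]
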